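-- pv_equiv track=rewrite | github.com/jt914/HackMIT25 | backend/app/services/interactive_lesson_service.py | _is_giving_up
-- ===== SOURCE A (Python) =====
-- def _is_giving_up(message: str) -> bool:
--     """Check if the user is giving up."""
--     give_up_phrases = [
--         "i give up", "give up", "i don't know", "no idea",
--         "can't figure", "show me the answer", "what's the solution",
--         "i'm stuck", "tell me the answer", "reveal the solution"
--     ]
--
--     message_lower = message.lower()
--     return any(phrase in message_lower for phrase in give_up_phrases)
-- ===== SOURCE B (Python) =====
-- def _is_giving_up(message: str) -> bool:
--     """Check if the user is giving up."""
--     give_up_phrases = (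
--         "i give up", "give up", "i don't know", "no idea",
--         "can't figure", "show me the answer", "what's the solution",
--         "i'm stuck", "tell me the answer", "reveal the solution"
--     )
--
--     m = message.lower()
--     # Walk the suffixes of the lowered message; a phrase occurs iff it is a
--     # prefix of some suffix. Stops at the first hit.
--     while m:
--         for p in give_up_phrases:
--             if m.startswith(p):
--                 return True
--         m = m[1:]
--     return False
-- ===== Notes on version B (the rewrite author's own statement) =====
-- stated objective: alternative
-- what changed: B replaces A's ten independent whole-message substring searches by one explicit suffix-shrinking scan of the lowered message that tests each phrase as a prefix of the current suffix and returns at the first hit; the per-step suffix slice makes B slower on long messages.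
import Mathlib
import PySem

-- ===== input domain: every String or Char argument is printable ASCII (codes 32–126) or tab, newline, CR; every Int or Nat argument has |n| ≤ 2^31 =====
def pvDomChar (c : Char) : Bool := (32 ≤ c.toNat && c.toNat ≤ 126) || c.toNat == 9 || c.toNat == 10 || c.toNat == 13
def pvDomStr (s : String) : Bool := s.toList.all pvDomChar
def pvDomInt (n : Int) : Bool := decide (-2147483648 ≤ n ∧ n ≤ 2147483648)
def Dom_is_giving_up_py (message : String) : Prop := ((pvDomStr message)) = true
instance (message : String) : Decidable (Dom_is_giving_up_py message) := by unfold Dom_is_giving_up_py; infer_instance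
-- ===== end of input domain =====

-- B walks the suffixes of the lowered message testing each phrase as a prefix (first hit wins), instead of A's per-phrase whole-message substring searches; alternative decomposition, same results.


-- ===== PORT A =====
def pvGuPhrasesA : List String :=
  ["i give up", "give up", "i don't know", "no idea",
   "can't figure", "show me the answer", "what's the solution",
   "i'm stuck", "tell me the answer", "reveal the solution"]

def is_giving_up_py (message : String) : Bool :=
  let message_lower := PySem.Str.lower message
  pvGuPhrasesA.any (fun phrase => PySem.Str.isIn phrase message_lower)

-- ===== PORT B =====
-- B's phrase tuple, kept as character lists since B works on the char level
def pvGuPhrasesB : List (List Char) :=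
  ["i give up".toList, "give up".toList, "i don't know".toList, "no idea".toList,
   "can't figure".toList, "show me the answer".toList, "what's the solution".toList,
   "i'm stuck".toList, "tell me the answer".toList, "reveal the solution".toList]

-- the 'while m: … m = m[1:]' loop, as structural recursion on the suffix
def pvGuScan : List Char → Bool
  | [] => false
  | c :: t =>
      if pvGuPhrasesB.any (fun p => PySem.Chars.startswith (c :: t) p) then true
      else pvGuScan t

def is_giving_up_py_alt (message : String) : Bool :=
  pvGuScan (PySem.Str.lower message).toList

-- ===== PRECONDITION & SPEC =====
def Spec_is_giving_up_py (message : String) (out : Bool) : Prop := out = is_giving_up_py_alt message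
instance (message : String) (out : Bool) : Decidable (Spec_is_giving_up_py message out) := by unfold Spec_is_giving_up_py; infer_instance

-- ===== CLAIM (what is proved, stated in full; the proofs are below) =====
def Claim_equal_is_giving_up_py : Prop := ∀ (message : String), Dom_is_giving_up_py message → Spec_is_giving_up_py message (is_giving_up_py message)

-- ===== LEMMAS AND PROOFS =====

theorem pv_phrases_nonempty : ∀ p ∈ pvGuPhrasesB, p ≠ [] := by decide

theorem pv_phrase_lists : pvGuPhrasesA.map String.toList = pvGuPhrasesB := by decide

theorem pv_scan_iff (m : List Char) :
    pvGuScan m = true ↔ ∃ p ∈ pvGuPhrasesB, p <:+: m := by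
  induction m with
  | nil =>
      rw [show pvGuScan [] = false from rfl]
      simp only [Bool.false_eq_true, false_iff]
      rintro ⟨p, hp, hinf⟩
      exact pv_phrases_nonempty p hp (List.eq_nil_of_infix_nil hinf)
  | cons c t ih =>
      simp only [pvGuScan]
      split_ifs with h
      · simp only [true_iff]
        rw [List.any_eq_true] at h
        obtain ⟨p, hp, hsw⟩ := h
        exact ⟨p, hp, ((PySem.Chars.startswith_iff _ _).mp hsw).isInfix⟩
      · rw [ih]
        constructor
        · rintro ⟨p, hp, hinf⟩; exact ⟨p, hp, hinf.trans (List.suffix_cons c t).isInfix⟩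
        · rintro ⟨p, hp, hinf⟩
          rcases List.infix_cons_iff.mp hinf with hpre | hinf'
          · exact absurd (List.any_eq_true.mpr ⟨p, hp, (PySem.Chars.startswith_iff _ _).mpr hpre⟩) h
          · exact ⟨p, hp, hinf'⟩

-- ===== VERDICT (by name: the statement is the Claim_ definition above) =====
theorem is_giving_up_py_spec : Claim_equal_is_giving_up_py := by
  intro message _
  unfold Spec_is_giving_up_py is_giving_up_py is_giving_up_py_alt
  rw [Bool.eq_iff_iff, pv_scan_iff, List.any_eq_true]
  constructor
  · rintro ⟨p, hp, hin⟩
    exact ⟨p.toList, pv_phrase_lists ▸ List.mem_map_of_mem hp,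
      (PySem.Str.isIn_iff_infix _ _).mp hin⟩
  · rintro ⟨pl, hpl, hinf⟩
    rw [← pv_phrase_lists, List.mem_map] at hpl
    obtain ⟨p, hp, rfl⟩ := hpl
    exact ⟨p, hp, (PySem.Str.isIn_iff_infix _ _).mpr hinf⟩
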